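-- pv_equiv track=rewrite | github.com/mcp-tool-shop/voice-soundboard | voice_soundboard/ssml.py | _format_cardinal
-- ===== SOURCE A (Python) =====
-- def _format_cardinal(num_str: str) -> str:
--     """Format number as cardinal."""
--     try:
--         num = int(num_str.replace(",", ""))
--         # Simple number to words for common cases
--         if num < 0:
--             return "negative " + _format_cardinal(str(-num))
--         if num == 0:
--             return "zero"
--         if num < 20:
--             words = [
--                 "", "one", "two", "three", "four", "five", "six", "seven",
--                 "eight", "nine", "ten", "eleven", "twelve", "thirteen",
--                 "fourteen", "fifteen", "sixteen", "seventeen", "eighteen", "nineteen"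
--             ]
--             return words[num]
--         if num < 100:
--             tens = ["", "", "twenty", "thirty", "forty", "fifty", "sixty", "seventy", "eighty", "ninety"]
--             return tens[num // 10] + ("-" + _format_cardinal(str(num % 10)) if num % 10 else "")
--         # For larger numbers, just return the string (TTS handles it)
--         return num_str
--     except ValueError:
--         return num_str
-- ===== SOURCE B (Python) =====
-- def _format_cardinal(num_str: str) -> str:
--     """Format number as cardinal via a precomputed 0-99 word table."""
--     try:
--         num = int(num_str.replace(",", ""))
--     except ValueError:
--         return num_str
--     if not -100 < num < 100:
--         # Outside the table, just return the string (TTS handles it)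
--         return num_str
--     ones = [
--         "zero", "one", "two", "three", "four", "five", "six", "seven",
--         "eight", "nine", "ten", "eleven", "twelve", "thirteen",
--         "fourteen", "fifteen", "sixteen", "seventeen", "eighteen", "nineteen"
--     ]
--     tens = ["", "", "twenty", "thirty", "forty", "fifty", "sixty", "seventy", "eighty", "ninety"]
--     table = ones + [tens[t] + ("-" + ones[o] if o else "")
--                     for t in range(2, 10) for o in range(10)]
--     return ("negative " if num < 0 else "") + table[abs(num)]
-- ===== Notes on version B (the rewrite author's own statement) =====
-- stated objective: alternative
-- what changed: Replaced A's two-level self-recursion and branch-by-branch word assembly by a precomputed 0-99 word table built once by a comprehension, a range guard, and a single indexed lookup with a sign flag.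
-- intended difference: On inputs that parse (after comma removal) to an integer at or below -100, A prepends the word negative to the plain digit string of the absolute value (dropping any commas, so -1,234 becomes negative 1234), while B returns num_str unchanged, the same passthrough-to-TTS behaviour A itself applies to large positive numbers, which is the intended one. — e.g. on _format_cardinal("-100"): A returns "negative 100", B returns "-100"
import Mathlib
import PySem

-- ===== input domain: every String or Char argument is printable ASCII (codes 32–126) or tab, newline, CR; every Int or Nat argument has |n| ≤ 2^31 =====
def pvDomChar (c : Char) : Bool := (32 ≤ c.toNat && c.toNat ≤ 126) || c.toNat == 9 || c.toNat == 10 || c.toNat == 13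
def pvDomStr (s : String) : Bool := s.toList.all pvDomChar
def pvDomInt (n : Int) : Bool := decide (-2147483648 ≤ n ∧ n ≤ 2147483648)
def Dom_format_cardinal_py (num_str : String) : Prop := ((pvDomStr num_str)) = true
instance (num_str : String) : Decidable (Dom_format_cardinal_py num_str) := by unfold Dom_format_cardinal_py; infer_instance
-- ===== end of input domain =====

-- B replaces A's self-recursion by a precomputed 0–99 word table (built once by a comprehension)
-- and one indexed lookup; for |num| ≥ 100 it always passes num_str through (A instead rebuilds a
-- word-prefixed digit string for num ≤ -100); objective: alternative.

-- ===== PORT A =====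
def fcWords : List String :=
  ["", "one", "two", "three", "four", "five", "six", "seven",
   "eight", "nine", "ten", "eleven", "twelve", "thirteen",
   "fourteen", "fifteen", "sixteen", "seventeen", "eighteen", "nineteen"]

def fcTens : List String :=
  ["", "", "twenty", "thirty", "forty", "fifty", "sixty", "seventy", "eighty", "ninety"]

-- fuel bounds the recursion depth; A's real call chain is at most 3 deep
-- (negative → positive → ones digit), so fuel 3 is never exhausted.
def fcAux : Nat → String → String
  | 0, s => s
  | fuel + 1, s =>
    match PySem.Int.ofStr? (PySem.Str.replace s "," "") with
    | none => s            -- except ValueError: return num_str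
    | some num =>
      if num < 0 then "negative " ++ fcAux fuel (PySem.Int.toStr (-num))
      else if num = 0 then "zero"
      else if num < 20 then PySem.List.pyGetD fcWords num ""
      else if num < 100 then
        PySem.List.pyGetD fcTens (PySem.Int.floordiv num 10) "" ++
          (if PySem.Int.mod num 10 ≠ 0 then
             "-" ++ fcAux fuel (PySem.Int.toStr (PySem.Int.mod num 10))
           else "")
      else s

def format_cardinal_py (num_str : String) : String := fcAux 3 num_str

-- ===== PORT B =====
def altOnes : List String :=
  ["zero", "one", "two", "three", "four", "five", "six", "seven",
   "eight", "nine", "ten", "eleven", "twelve", "thirteen",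
   "fourteen", "fifteen", "sixteen", "seventeen", "eighteen", "nineteen"]

def altTens : List String :=
  ["", "", "twenty", "thirty", "forty", "fifty", "sixty", "seventy", "eighty", "ninety"]

-- table = ones + [tens[t] + ("-" + ones[o] if o else "") for t in range(2,10) for o in range(10)]
def altTable : List String :=
  altOnes ++
    (PySem.List.pyRange 2 10 1).flatMap (fun t =>
      (PySem.List.pyRange 0 10 1).map (fun o =>
        PySem.List.pyGetD altTens t "" ++
          (if o ≠ 0 then "-" ++ PySem.List.pyGetD altOnes o "" else "")))

def format_cardinal_py_alt (num_str : String) : String :=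
  match PySem.Int.ofStr? (PySem.Str.replace num_str "," "") with
  | none => num_str
  | some num =>
    if ¬ (-100 < num ∧ num < 100) then num_str
    else (if num < 0 then "negative " else "") ++ PySem.List.pyGetD altTable |num| ""

-- ===== PRECONDITION & SPEC =====
-- On inputs parsing (after comma removal) to an integer at or below -100, A prepends the word
-- negative to the plain digit string of the absolute value (dropping any commas), while B returns
-- num_str unchanged, the passthrough A itself applies to large positives, which is the intended one.
def D_format_cardinal_py (num_str : String) : Prop :=
  (PySem.Int.ofStr? (PySem.Str.replace num_str "," "")).getD 0 ≤ -100
instance (num_str : String) : Decidable (D_format_cardinal_py num_str) := by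
  unfold D_format_cardinal_py; infer_instance

def Spec_format_cardinal_py (num_str : String) (out : String) : Prop :=
  ¬ D_format_cardinal_py num_str → out = format_cardinal_py_alt num_str
instance (num_str : String) (out : String) : Decidable (Spec_format_cardinal_py num_str out) := by
  unfold Spec_format_cardinal_py; infer_instance

def pvDiffWitness_format_cardinal_py : String := "-100"
def pvDiffWitnessOut_format_cardinal_py : String × String := ("negative 100", "-100")

-- ===== CLAIM (what is proved, stated in full; the proofs are below) =====
def Claim_unchanged_format_cardinal_py : Prop :=
  ∀ (num_str : String), Dom_format_cardinal_py num_str →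
    Spec_format_cardinal_py num_str (format_cardinal_py num_str)

def Claim_changed_format_cardinal_py : Prop :=
  Dom_format_cardinal_py (pvDiffWitness_format_cardinal_py) ∧
  D_format_cardinal_py (pvDiffWitness_format_cardinal_py) ∧
  format_cardinal_py (pvDiffWitness_format_cardinal_py) = pvDiffWitnessOut_format_cardinal_py.1 ∧
  format_cardinal_py_alt (pvDiffWitness_format_cardinal_py) = pvDiffWitnessOut_format_cardinal_py.2 ∧
  pvDiffWitnessOut_format_cardinal_py.1 ≠ pvDiffWitnessOut_format_cardinal_py.2

def Claim_exact_format_cardinal_py : Prop :=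
  ∀ (num_str : String), Dom_format_cardinal_py num_str → D_format_cardinal_py num_str →
    format_cardinal_py num_str ≠ format_cardinal_py_alt num_str

-- ===== LEMMAS AND PROOFS =====

theorem fcAux_succ (fuel : Nat) (s : String) :
    fcAux (fuel + 1) s =
      match PySem.Int.ofStr? (PySem.Str.replace s "," "") with
      | none => s
      | some num =>
        if num < 0 then "negative " ++ fcAux fuel (PySem.Int.toStr (-num))
        else if num = 0 then "zero"
        else if num < 20 then PySem.List.pyGetD fcWords num ""
        else if num < 100 then
          PySem.List.pyGetD fcTens (PySem.Int.floordiv num 10) "" ++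
            (if PySem.Int.mod num 10 ≠ 0 then
               "-" ++ fcAux fuel (PySem.Int.toStr (PySem.Int.mod num 10))
             else "")
        else s := rfl

-- fcAux at fuel 2 on the digits of 1 ≤ k < 100 computes exactly B's table entry
set_option maxRecDepth 4000 in
theorem fcAux2_table : ∀ k : Nat, 1 ≤ k → k < 100 →
    fcAux 2 (PySem.Int.toStr (k : Int)) = PySem.List.pyGetD altTable (k : Int) "" := by decide

set_option maxRecDepth 4000 in
theorem words_table : ∀ k : Nat, 1 ≤ k → k < 20 →
    PySem.List.pyGetD fcWords (k : Int) "" = "" ++ PySem.List.pyGetD altTable (k : Int) "" := by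
  decide

set_option maxRecDepth 4000 in
theorem tens_table : ∀ k : Nat, 20 ≤ k → k < 100 →
    PySem.List.pyGetD fcTens (PySem.Int.floordiv (k : Int) 10) "" ++
        (if PySem.Int.mod (k : Int) 10 ≠ 0 then
           "-" ++ fcAux 2 (PySem.Int.toStr (PySem.Int.mod (k : Int) 10))
         else "") =
      "" ++ PySem.List.pyGetD altTable (k : Int) "" := by decide

-- go with old=",", new="" always returns acc.reverse ++ something
theorem replace_go_acc : ∀ (fuel : Nat) (l acc : List Char),
    ∃ z, PySem.Chars.replace.go [','] [] fuel l acc = acc.reverse ++ z := by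
  intro fuel
  induction fuel with
  | zero => intro l acc; exact ⟨l, rfl⟩
  | succ n ih =>
    intro l acc
    cases l with
    | nil => exact ⟨[], by simp [PySem.Chars.replace.go]⟩
    | cons c t =>
      by_cases hp : [','].isPrefixOf (c :: t) = true
      · obtain ⟨z, hz⟩ := ih (List.drop 1 (c :: t)) acc
        exact ⟨z, by simp only [PySem.Chars.replace.go, hp, if_pos]; simpa using hz⟩
      · obtain ⟨z, hz⟩ := ih t (c :: acc)
        refine ⟨c :: z, ?_⟩
        simp only [PySem.Chars.replace.go, hp]
        simp only [List.reverse_cons] at hz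
        simpa using hz

theorem noComma_head : ∀ Y : String,
    ∃ ds, (PySem.Str.replace ("negative " ++ Y) "," "").toList = 'n' :: ds := by
  intro Y
  rw [PySem.Str.toList_replace]
  have h1 : ("negative " ++ Y).toList = 'n' :: ("egative ".toList ++ Y.toList) := by
    simp [String.toList_append]
  rw [h1]
  show ∃ ds, PySem.Chars.replace ('n' :: ("egative ".toList ++ Y.toList)) [','] [] = 'n' :: ds
  rw [PySem.Chars.replace]
  simp only [List.isEmpty_cons, Bool.false_eq_true, if_false, List.length_cons]
  rw [show PySem.Chars.replace.go [','] [] (("egative ".toList ++ Y.toList).length + 1)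
        ('n' :: ("egative ".toList ++ Y.toList)) [] =
      PySem.Chars.replace.go [','] [] (("egative ".toList ++ Y.toList).length)
        ("egative ".toList ++ Y.toList) ['n'] from by
    simp [PySem.Chars.replace.go, List.isPrefixOf]]
  obtain ⟨z, hz⟩ := replace_go_acc ("egative ".toList ++ Y.toList).length
    ("egative ".toList ++ Y.toList) ['n']
  exact ⟨z, by simpa using hz⟩

theorem parse_n_none : ∀ zs : List Char, PySem.Int.ofChars? ('n' :: zs) = none := by
  intro zs
  simp only [PySem.Int.ofChars?]
  have h1 : List.dropWhile PySem.Int.isIntSpace ('n' :: zs) = 'n' :: zs := by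
    simp [List.dropWhile, PySem.Int.isIntSpace]
  rw [h1, List.reverse_cons, List.dropWhile_append]
  by_cases he : (List.dropWhile PySem.Int.isIntSpace zs.reverse).isEmpty = true
  · rw [if_pos he]
    decide
  · rw [if_neg he, List.reverse_append, List.reverse_cons, List.reverse_nil, List.nil_append,
        List.cons_append, List.nil_append]
    exact rfl

-- ===== VERDICT (by name: the statement is the Claim_ definition above) =====
theorem format_cardinal_py_spec : Claim_unchanged_format_cardinal_py := by
  intro s hDom
  unfold Spec_format_cardinal_py D_format_cardinal_py
  intro hnD
  unfold format_cardinal_py format_cardinal_py_alt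
  cases h : PySem.Int.ofStr? (PySem.Str.replace s "," "") with
  | none => simp [fcAux, h]
  | some num =>
    rw [h] at hnD
    simp only [Option.getD_some, not_le] at hnD
    rw [show (3:Nat) = 2+1 from rfl, fcAux_succ]
    simp only [h]
    rcases lt_trichotomy num 0 with hneg | rfl | hpos
    · -- -100 < num < 0 : A = "negative " ++ recursion, B = "negative " ++ table entry
      obtain ⟨k, hk1, hk2, rfl⟩ :
          ∃ k : Nat, 1 ≤ k ∧ k < 100 ∧ num = -(k : Int) :=
        ⟨num.natAbs, by omega, by omega, by omega⟩
      rw [if_pos (show -(k:Int) < 0 by omega), neg_neg, fcAux2_table k hk1 hk2]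
      rw [if_neg (show ¬ ¬ (-100 < -(k:Int) ∧ -(k:Int) < 100) by push Not; omega)]
      have habs : |(-(k:Int))| = (k:Int) := by simp
      rw [if_pos (show -(k:Int) < 0 by omega), habs]
    · -- num = 0
      rw [if_neg (show ¬ ¬ (-100 < (0:Int) ∧ (0:Int) < 100) by norm_num)]
      simp only [lt_irrefl, if_pos]
      norm_num
      decide
    · -- 0 < num
      obtain ⟨k, hk1, rfl⟩ : ∃ k : Nat, 1 ≤ k ∧ num = (k : Int) :=
        ⟨num.toNat, by omega, by omega⟩
      rw [if_neg (show ¬ ((k:Int) < 0) by omega), if_neg (show ¬ ((k:Int) = 0) by omega)]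
      by_cases h100 : (k:Int) < 100
      · rw [if_neg (show ¬ ¬ (-100 < (k:Int) ∧ (k:Int) < 100) by push Not; omega)]
        have habs : |((k:Int))| = (k:Int) := by simp
        rw [if_neg (show ¬ ((k:Int) < 0) by omega), habs]
        by_cases h20 : (k:Int) < 20
        · rw [if_pos h20]
          exact words_table k hk1 (by omega)
        · rw [if_neg h20, if_pos h100]
          exact tens_table k (by omega) (by omega)
      · rw [if_neg (show ¬ ((k:Int) < 20) by omega), if_neg h100,
            if_pos (show ¬ (-100 < (k:Int) ∧ (k:Int) < 100) by push Not; omega)]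

theorem format_cardinal_py_changed : Claim_changed_format_cardinal_py := by
  unfold Claim_changed_format_cardinal_py; decide

theorem format_cardinal_py_tight : Claim_exact_format_cardinal_py := by
  intro s hDom hD
  unfold D_format_cardinal_py at hD
  cases h : PySem.Int.ofStr? (PySem.Str.replace s "," "") with
  | none => rw [h] at hD; simp at hD
  | some num =>
    rw [h] at hD
    simp only [Option.getD_some] at hD
    have hA : format_cardinal_py s = "negative " ++ fcAux 2 (PySem.Int.toStr (-num)) := by
      unfold format_cardinal_py
      rw [show (3:Nat) = 2+1 from rfl, fcAux_succ]
      simp only [h]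
      rw [if_pos (show num < 0 by omega)]
    have hB : format_cardinal_py_alt s = s := by
      unfold format_cardinal_py_alt
      simp only [h]
      rw [if_pos (show ¬ (-100 < num ∧ num < 100) by push Not; omega)]
    rw [hA, hB]
    intro heq
    rw [← heq] at h
    obtain ⟨ds, hds⟩ := noComma_head (fcAux 2 (PySem.Int.toStr (-num)))
    rw [show PySem.Int.ofStr?
          (PySem.Str.replace ("negative " ++ fcAux 2 (PySem.Int.toStr (-num))) "," "") =
        PySem.Int.ofChars?
          (PySem.Str.replace ("negative " ++ fcAux 2 (PySem.Int.toStr (-num))) "," "").toList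
        from rfl, hds, parse_n_none] at h
    exact absurd h (by simp)
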